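-- pv_equiv track=rewrite | github.com/xxpopielxx/DSA | Offlines/2.2223.py | snow
-- ===== SOURCE A (Python) =====
-- def merge(left, right):
--     result = []
--     l = r = 0
--     while l < len(left) and r < len(right):
--         if left[l] < right[r]:
--             result.append(left[l])
--             l += 1
--         else:
--             result.append(right[r])
--             r += 1
--     while l < len(left):
--         result.append(left[l])
--         l += 1
--     while r < len(right):
--         result.append(right[r])
--         r += 1
--     return result
--
-- def ms(T):
--     if len(T) < 2:
--         return T
--     mid = len(T) // 2
--     left = ms(T[:mid])
--     right = ms(T[mid:])
--     return merge(left, right)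
--
-- def snow(S):
--     S = ms(S)
--     S = S[::-1]
--     maxi = 0
--     for i in range(len(S)):
--         snow_collected = S[i] - i
--         if snow_collected > 0:
--             maxi += snow_collected
--         else:
--             break
--     return maxi
-- ===== SOURCE B (Python) =====
-- def snow(S):
--     # Counting approach: no sort. For each level j >= 1, the answer gains
--     # min(j, #{x in S : x >= j}); levels above n contribute #{x >= j} each,
--     # which telescopes to sum(x - n for x in S if x > n).
--     n = len(S)
--     cnt = {}
--     tail = 0
--     for x in S:
--         m = min(max(x, 0), n)
--         cnt[m] = cnt.get(m, 0) + 1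
--         if x > n:
--             tail += x - n
--     total = 0
--     c = 0
--     for j in range(n, 0, -1):
--         c += cnt.get(j, 0)
--         total += min(j, c)
--     return total + tail
-- ===== Notes on version B (the rewrite author's own statement) =====
-- stated objective: faster
-- what changed: Replaces A's recursive mergesort + reverse + positional scan by a sort-free counting method: one pass builds a dict histogram of values clamped to [0,n] plus the overflow sum of x-n for x>n, then a single descending sweep over levels j=n..1 accumulates min(j, #{x >= j}).
import Mathlib
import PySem

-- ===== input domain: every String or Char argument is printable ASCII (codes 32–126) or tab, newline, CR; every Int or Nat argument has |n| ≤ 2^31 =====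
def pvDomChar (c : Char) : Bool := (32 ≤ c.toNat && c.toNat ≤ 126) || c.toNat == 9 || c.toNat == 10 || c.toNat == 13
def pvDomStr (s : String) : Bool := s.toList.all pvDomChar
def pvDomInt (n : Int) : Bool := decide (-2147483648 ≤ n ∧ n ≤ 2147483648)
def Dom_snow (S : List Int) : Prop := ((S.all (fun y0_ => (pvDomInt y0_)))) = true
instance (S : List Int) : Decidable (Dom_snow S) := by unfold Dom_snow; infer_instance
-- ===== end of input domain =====

-- B replaces A's mergesort + reverse + positional scan by a sort-free counting method:
-- a histogram of the values clamped to [0,n] plus the overflow sum, then one descending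
-- sweep over levels j = n..1 adding min(j, #{x ≥ j}) (objective: faster).

-- ===== PORT A =====
-- the two-pointer while loops of Python's merge, as the obvious recursion on the two lists
def merge : List Int → List Int → List Int
  | left, [] => left
  | [], right => right
  | a :: l, b :: r =>
    if a < b then a :: merge l (b :: r) else b :: merge (a :: l) r

def ms (T : List Int) : List Int :=
  if T.length < 2 then T
  else merge (ms (T.take (T.length / 2))) (ms (T.drop (T.length / 2)))
termination_by T.length
decreasing_by
  · simp only [List.length_take]; omega
  · simp only [List.length_drop]; omega

-- the 'for i in range(len(S))' loop with its break, as recursion on the index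
def snowLoop (S : List Int) (i : Nat) (maxi : Int) : Int :=
  if h : S.length ≤ i then maxi
  else
    -- snow_collected = S[i] - i
    if S[i]'(by omega) - (i : Int) > 0 then snowLoop S (i + 1) (maxi + (S[i]'(by omega) - (i : Int))) else maxi
termination_by S.length - i

def snow (S : List Int) : Int := snowLoop ((ms S).reverse) 0 0

-- ===== PORT B =====
-- m = min(max(x, 0), n)
def bClamp (n x : Int) : Int := min (max x 0) n
-- cnt[m] = cnt.get(m, 0) + 1   on the clamped key
def bCount (n : Int) (d : PySem.Dict Int Int) (x : Int) : PySem.Dict Int Int :=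
  d.insert (bClamp n x) (d.getD (bClamp n x) 0 + 1)
-- if x > n: tail += x - n
def bTail (n tl x : Int) : Int := if x > n then tl + (x - n) else tl
-- body of 'for j in range(n, 0, -1)': c += cnt.get(j, 0); total += min(j, c)
def bStep (cnt : PySem.Dict Int Int) (q : Int × Int) (j : Int) : Int × Int :=
  let c := q.2 + cnt.getD j 0
  (q.1 + min j c, c)

def snow_alt (S : List Int) : Int :=
  let n : Int := S.length
  let p := S.foldl (fun s x => (bCount n s.1 x, bTail n s.2 x)) (PySem.Dict.empty, 0)
  let tc := (PySem.List.pyRange n 0 (-1)).foldl (bStep p.1) (0, 0)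
  tc.1 + p.2

-- ===== PRECONDITION & SPEC =====
def Spec_snow (S : List Int) (out : Int) : Prop := out = snow_alt S
instance (S : List Int) (out : Int) : Decidable (Spec_snow S out) := by unfold Spec_snow; infer_instance

-- ===== CLAIM (what is proved, stated in full; the proofs are below) =====
def Claim_equal_snow : Prop := ∀ (S : List Int), Dom_snow S → Spec_snow S (snow S)

-- ===== LEMMAS AND PROOFS =====

theorem merge_perm : ∀ (l r : List Int), (merge l r).Perm (l ++ r) := by
  intro l r
  induction l, r using merge.induct with
  | case1 left => simp [merge]
  | case2 right => cases right <;> simp [merge]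
  | case3 a l b r h ih =>
      simp only [merge, if_pos h]
      exact (ih.cons a).trans (by simp)
  | case4 a l b r h ih =>
      simp only [merge, if_neg h]
      refine (ih.cons b).trans ?_
      refine List.Perm.trans ?_ (List.perm_middle.symm)
      simp

theorem mem_merge {x : Int} {l r : List Int} : x ∈ merge l r ↔ x ∈ l ∨ x ∈ r := by
  have := (merge_perm l r).mem_iff (a := x)
  simpa using this

theorem merge_pairwise : ∀ (l r : List Int), l.Pairwise (· ≤ ·) → r.Pairwise (· ≤ ·) →
    (merge l r).Pairwise (· ≤ ·) := by
  intro l r hl hr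
  induction l, r using merge.induct with
  | case1 left => simpa [merge] using hl
  | case2 right =>
      cases right with
      | nil => simp [merge]
      | cons b r => simpa [merge] using hr
  | case3 a l b r h ih =>
      simp only [merge, if_pos h]
      rcases List.pairwise_cons.mp hl with ⟨ha, hl'⟩
      refine List.pairwise_cons.mpr ⟨?_, ih hl' hr⟩
      intro x hx
      rcases mem_merge.mp hx with hx | hx
      · exact ha x hx
      · rcases List.mem_cons.mp hx with rfl | hx
        · exact le_of_lt h
        · exact le_trans (le_of_lt h) ((List.pairwise_cons.mp hr).1 x hx)
  | case4 a l b r h ih =>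
      simp only [merge, if_neg h]
      rcases List.pairwise_cons.mp hr with ⟨hb, hr'⟩
      have hba : b ≤ a := le_of_not_gt h
      refine List.pairwise_cons.mpr ⟨?_, ih hl hr'⟩
      intro x hx
      rcases mem_merge.mp hx with hx | hx
      · rcases List.mem_cons.mp hx with rfl | hx
        · exact hba
        · exact le_trans hba ((List.pairwise_cons.mp hl).1 x hx)
      · exact hb x hx

theorem ms_perm : ∀ (T : List Int), (ms T).Perm T := by
  intro T
  induction T using ms.induct with
  | case1 T h => simp [ms, h]
  | case2 T h ih1 ih2 =>
      rw [ms, if_neg h]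
      refine (merge_perm _ _).trans ?_
      refine ((ih1.append ih2).trans ?_)
      simp

theorem ms_pairwise : ∀ (T : List Int), (ms T).Pairwise (· ≤ ·) := by
  intro T
  induction T using ms.induct with
  | case1 T h =>
      rw [ms, if_pos h]
      match T, h with
      | [], _ => simp
      | [a], _ => simp
  | case2 T h ih1 ih2 => rw [ms, if_neg h]; exact merge_pairwise _ _ ih1 ih2

-- A's scanned list t = (ms S).reverse is descending
theorem t_pairwise (S : List Int) : ((ms S).reverse).Pairwise (· ≥ ·) := by
  rw [List.pairwise_reverse]
  exact (ms_pairwise S).imp (by intro a b hab; exact hab)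

theorem t_perm (S : List Int) : ((ms S).reverse).Perm S :=
  ((ms S).reverse_perm).trans (ms_perm S)

-- accumulator of A's loop splits off
theorem snowLoop_acc (t : List Int) (i : Nat) (maxi : Int) :
    snowLoop t i maxi = maxi + snowLoop t i 0 := by
  rw [snowLoop]
  conv_rhs => rw [snowLoop]
  by_cases h : t.length ≤ i
  · rw [dif_pos h, dif_pos h]; ring
  · rw [dif_neg h, dif_neg h]
    by_cases h2 : t[i]'(by omega) - (i : Int) > 0
    · rw [if_pos h2, if_pos h2,
        snowLoop_acc t (i + 1) (maxi + (t[i]'(by omega) - (i : Int))),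
        snowLoop_acc t (i + 1) (0 + (t[i]'(by omega) - (i : Int)))]
      ring
    · rw [if_neg h2, if_neg h2]; ring
termination_by t.length - i

-- on a descending list, the break is harmless: the loop computes the full clipped sum
theorem snowLoop_sum (t : List Int) (hp : t.Pairwise (· ≥ ·)) (i : Nat) :
    snowLoop t i 0 = ∑ k ∈ Finset.Ico i t.length, max 0 (t.getD k 0 - (k : Int)) := by
  rw [snowLoop]
  by_cases h : t.length ≤ i
  · rw [dif_pos h]
    rw [Finset.Ico_eq_empty (by omega), Finset.sum_empty]
  · rw [dif_neg h]
    have hij : ∀ j k : Nat, j ≤ k → k < t.length →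
        t.getD k 0 ≤ t.getD j 0 := by
      intro j k hjk hk
      rcases eq_or_lt_of_le hjk with rfl | hlt
      · exact le_refl _
      · rw [List.getD_eq_getElem t 0 hk, List.getD_eq_getElem t 0 (by omega)]
        exact List.pairwise_iff_getElem.mp hp j k (by omega) hk hlt
    by_cases h2 : t[i]'(by omega) - (i : Int) > 0
    · rw [if_pos h2, snowLoop_acc, snowLoop_sum t hp (i + 1),
        Finset.sum_eq_sum_Ico_succ_bot (by omega : i < t.length)]
      have : max 0 (t.getD i 0 - (i : Int)) = t[i]'(by omega) - (i : Int) := by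
        rw [List.getD_eq_getElem t 0 (by omega)]; omega
      rw [this]; ring
    · rw [if_neg h2]
      symm
      apply Finset.sum_eq_zero
      intro k hk
      rcases Finset.mem_Ico.mp hk with ⟨hik, hkn⟩
      have h1 : t.getD k 0 ≤ t.getD i 0 := hij i k hik hkn
      have h0 : t.getD i 0 = t[i]'(by omega) := List.getD_eq_getElem t 0 (by omega)
      have : (i : Int) ≤ (k : Int) := by exact_mod_cast hik
      omega
termination_by t.length - i

-- positions-to-values: a sum of f over positions is the sum of the mapped list
theorem sum_range_getD (t : List Int) (f : Int → Int) :
    ∑ k ∈ Finset.range t.length, f (t.getD k 0) = (t.map f).sum := by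
  induction t with
  | nil => simp
  | cons a l ih =>
      rw [List.length_cons, Finset.sum_range_succ', List.map_cons, List.sum_cons]
      simp only [List.getD_cons_succ, List.getD_cons_zero]
      rw [ih]; ring

-- on a descending list, values ≥ m occupy exactly the first (countP) positions
theorem antitone_countP (t : List Int) (hp : t.Pairwise (· ≥ ·)) (m : Int) :
    ∀ k : Nat, k < t.length →
      ((m ≤ t.getD k 0) ↔ k < t.countP (fun x => decide (m ≤ x))) := by
  induction t with
  | nil => intro k hk; simp at hk
  | cons a l ih =>
      rcases List.pairwise_cons.mp hp with ⟨ha, hl⟩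
      intro k hk
      have hcnt : ¬ m ≤ a → l.countP (fun x => decide (m ≤ x)) = 0 := by
        intro hma
        apply List.countP_eq_zero.mpr
        intro x hx
        simp only [decide_eq_true_eq]
        have := ha x hx
        omega
      cases k with
      | zero =>
          simp only [List.getD_cons_zero, List.countP_cons]
          by_cases hma : m ≤ a
          · simp [hma]
          · simp [hma, hcnt hma]
      | succ k =>
          simp only [List.getD_cons_succ, List.countP_cons]
          have hk' : k < l.length := by simpa using hk
          rw [ih hl k hk']
          by_cases hma : m ≤ a
          · simp [hma]
          · rw [hcnt hma]
            simp [hma]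

-- each clipped term splits at level n and becomes a count of levels (an interval card)
theorem term_split (t : List Int) (k : Nat) (hk : k < t.length) :
    max 0 (t.getD k 0 - (k : Int))
      = (((Finset.Icc (1 : Int) (t.length : Int)).filter
            (fun m => (k : Int) < m ∧ m ≤ t.getD k 0)).card : Int)
        + max 0 (t.getD k 0 - (t.length : Int)) := by
  have hfe : (Finset.Icc (1 : Int) (t.length : Int)).filter
        (fun m => (k : Int) < m ∧ m ≤ t.getD k 0)
      = Finset.Ioc (k : Int) (min (t.getD k 0) (t.length : Int)) := by
    ext m
    simp only [Finset.mem_filter, Finset.mem_Icc, Finset.mem_Ioc, le_min_iff]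
    constructor
    · rintro ⟨⟨h1, h2⟩, h3, h4⟩; exact ⟨h3, h4, h2⟩
    · rintro ⟨h1, h2, h3⟩
      have : (0 : Int) ≤ (k : Int) := by positivity
      exact ⟨⟨by omega, h3⟩, h1, h2⟩
  rw [hfe, Int.card_Ioc]
  have hkn : (k : Int) < (t.length : Int) := by exact_mod_cast hk
  omega

-- the descending-list fiber count: #{k < n : k < m ∧ m ≤ t[k]} = min m (countP (m ≤ ·))
theorem fiber_card (t : List Int) (hp : t.Pairwise (· ≥ ·)) (m : Int)
    (hm1 : 1 ≤ m) (_hmn : m ≤ (t.length : Int)) :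
    (((Finset.range t.length).filter (fun k : Nat => (k : Int) < m ∧ m ≤ t.getD k 0)).card : Int)
      = min m (t.countP (fun x => decide (m ≤ x)) : Int) := by
  set c := t.countP (fun x => decide (m ≤ x)) with hc
  have hcle : c ≤ t.length := List.countP_le_length
  have hfe : (Finset.range t.length).filter (fun k : Nat => (k : Int) < m ∧ m ≤ t.getD k 0)
      = Finset.range (min m.toNat c) := by
    ext k
    simp only [Finset.mem_filter, Finset.mem_range, lt_min_iff]
    constructor
    · rintro ⟨hk, h1, h2⟩
      have := (antitone_countP t hp m k hk).mp h2
      constructor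
      · omega
      · exact this
    · rintro ⟨h1, h2⟩
      have hk : k < t.length := by omega
      refine ⟨hk, by omega, (antitone_countP t hp m k hk).mpr h2⟩
  rw [hfe, Finset.card_range]
  omega

-- counting levels instead of positions: swap the double sum
theorem double_count (t : List Int) (hp : t.Pairwise (· ≥ ·)) :
    ∑ k ∈ Finset.range t.length, max 0 (t.getD k 0 - (k : Int))
      = (∑ m ∈ Finset.Icc (1 : Int) (t.length : Int),
            min m (t.countP (fun x => decide (m ≤ x)) : Int))
        + (t.map (fun x => max 0 (x - (t.length : Int)))).sum := by
  have h1 : ∑ k ∈ Finset.range t.length, max 0 (t.getD k 0 - (k : Int))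
      = ∑ k ∈ Finset.range t.length,
          ((((Finset.Icc (1 : Int) (t.length : Int)).filter
              (fun m => (k : Int) < m ∧ m ≤ t.getD k 0)).card : Int)
            + max 0 (t.getD k 0 - (t.length : Int))) := by
    apply Finset.sum_congr rfl
    intro k hk
    exact term_split t k (Finset.mem_range.mp hk)
  rw [h1, Finset.sum_add_distrib, sum_range_getD t (fun x => max 0 (x - (t.length : Int)))]
  congr 1
  have h2 : ∀ k : Nat, (((Finset.Icc (1 : Int) (t.length : Int)).filter
        (fun m => (k : Int) < m ∧ m ≤ t.getD k 0)).card : Int)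
      = ∑ m ∈ Finset.Icc (1 : Int) (t.length : Int),
          (if (k : Int) < m ∧ m ≤ t.getD k 0 then (1 : Int) else 0) := by
    intro k
    rw [Finset.card_filter]
    push_cast
    rfl
  calc ∑ k ∈ Finset.range t.length, (((Finset.Icc (1 : Int) (t.length : Int)).filter
            (fun m => (k : Int) < m ∧ m ≤ t.getD k 0)).card : Int)
      = ∑ k ∈ Finset.range t.length, ∑ m ∈ Finset.Icc (1 : Int) (t.length : Int),
          (if (k : Int) < m ∧ m ≤ t.getD k 0 then (1 : Int) else 0) := by
        exact Finset.sum_congr rfl (fun k _ => h2 k)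
    _ = ∑ m ∈ Finset.Icc (1 : Int) (t.length : Int), ∑ k ∈ Finset.range t.length,
          (if (k : Int) < m ∧ m ≤ t.getD k 0 then (1 : Int) else 0) := Finset.sum_comm
    _ = ∑ m ∈ Finset.Icc (1 : Int) (t.length : Int),
          min m (t.countP (fun x => decide (m ≤ x)) : Int) := by
        apply Finset.sum_congr rfl
        intro m hm
        rcases Finset.mem_Icc.mp hm with ⟨hm1, hmn⟩
        rw [← fiber_card t hp m hm1 hmn, Finset.card_filter]
        push_cast
        rfl

-- ===== B-side characterisation =====

-- the tail fold is the clipped overflow sum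
theorem tail_fold (n : Int) (S : List Int) (a : Int) :
    S.foldl (bTail n) a = a + (S.map (fun x => max 0 (x - n))).sum := by
  induction S generalizing a with
  | nil => simp
  | cons x l ih =>
      rw [List.foldl_cons, ih, List.map_cons, List.sum_cons]
      unfold bTail
      by_cases hx : x > n
      · rw [if_pos hx]
        have : max 0 (x - n) = x - n := by omega
        rw [this]; ring
      · rw [if_neg hx]
        have : max 0 (x - n) = 0 := by omega
        rw [this]; ring

-- the histogram lookup is a count of clamped values
theorem cnt_getD (n : Int) (S : List Int) (v : Int) :
    (S.foldl (bCount n) PySem.Dict.empty).getD v 0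
      = ((S.map (bClamp n)).count v : Int) := by
  unfold bCount
  rw [← List.foldl_map (f := bClamp n)
    (g := fun (d : PySem.Dict Int Int) (x : Int) => d.insert x (d.getD x 0 + 1))]
  rw [PySem.Dict.getD_foldl_insert_add_one]
  simp

-- a sum of counts over a finset is a countP
theorem sum_count (s : Finset Int) (l : List Int) :
    ∑ i ∈ s, (l.count i : Int) = (l.countP (fun x => decide (x ∈ s)) : Int) := by
  induction l with
  | nil => simp
  | cons x l ih =>
      have h1 : ∀ i : Int, ((x :: l).count i : Int) = (l.count i : Int)
          + (if i = x then (1 : Int) else 0) := by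
        intro i
        rw [List.count_cons]
        by_cases hix : x = i
        · subst hix; simp
        · have hne : ¬ i = x := fun h => hix h.symm
          simp [hix, hne]
      rw [Finset.sum_congr rfl (fun i _ => h1 i), Finset.sum_add_distrib, ih,
        Finset.sum_ite_eq' s x (fun _ => (1 : Int)), List.countP_cons]
      by_cases hxs : x ∈ s
      · simp [hxs]
      · simp [hxs]

-- the descending sweep, fully unrolled into level sums
theorem sweep_fold (g : Int → Int) (cnt : PySem.Dict Int Int)
    (hg : ∀ j, cnt.getD j 0 = g j) :
    ∀ (J : Nat) (tot c : Int),
      (PySem.List.pyRange (J : Int) 0 (-1)).foldl (bStep cnt) (tot, c)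
        = (tot + ∑ m ∈ Finset.Icc (1 : Int) (J : Int),
              min m (c + ∑ i ∈ Finset.Icc m (J : Int), g i),
           c + ∑ i ∈ Finset.Icc (1 : Int) (J : Int), g i) := by
  intro J
  induction J with
  | zero =>
      intro tot c
      rw [PySem.List.pyRange_neg_one_eq_nil (by omega)]
      simp
  | succ J ih =>
      intro tot c
      have hJ : ((J + 1 : Nat) : Int) = (J : Int) + 1 := by push_cast; ring
      rw [hJ, PySem.List.pyRange_neg_one_cons (by omega), List.foldl_cons]
      have hbs : bStep cnt (tot, c) ((J : Int) + 1)
          = (tot + min ((J : Int) + 1) (c + g ((J : Int) + 1)), c + g ((J : Int) + 1)) := by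
        unfold bStep
        rw [hg]
      have hsub : (J : Int) + 1 - 1 = (J : Int) := by ring
      rw [hbs, hsub, ih]
      have hins : ∀ a : Int, a ≤ (J : Int) + 1 →
          Finset.Icc a ((J : Int) + 1) = insert ((J : Int) + 1) (Finset.Icc a (J : Int)) := by
        intro a ha
        exact Eq.symm (Finset.insert_Icc_right_eq_Icc_add_one ha)
      have hnotmem : ∀ a : Int, ((J : Int) + 1) ∉ Finset.Icc a (J : Int) := by
        intro a hmem
        rcases Finset.mem_Icc.mp hmem with ⟨_, h2⟩
        omega
      have hc2 : c + g ((J : Int) + 1) + ∑ i ∈ Finset.Icc (1 : Int) (J : Int), g i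
          = c + ∑ i ∈ Finset.Icc (1 : Int) ((J : Int) + 1), g i := by
        rw [hins 1 (by omega), Finset.sum_insert (hnotmem 1)]
        ring
      have hc1 : tot + min ((J : Int) + 1) (c + g ((J : Int) + 1))
            + ∑ m ∈ Finset.Icc (1 : Int) (J : Int),
                min m (c + g ((J : Int) + 1) + ∑ i ∈ Finset.Icc m (J : Int), g i)
          = tot + ∑ m ∈ Finset.Icc (1 : Int) ((J : Int) + 1),
                min m (c + ∑ i ∈ Finset.Icc m ((J : Int) + 1), g i) := by
        rw [hins 1 (by omega), Finset.sum_insert (hnotmem 1)]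
        rw [Finset.Icc_self, Finset.sum_singleton]
        have hcong : ∑ m ∈ Finset.Icc (1 : Int) (J : Int),
              min m (c + g ((J : Int) + 1) + ∑ i ∈ Finset.Icc m (J : Int), g i)
            = ∑ m ∈ Finset.Icc (1 : Int) (J : Int),
              min m (c + ∑ i ∈ Finset.Icc m ((J : Int) + 1), g i) := by
          apply Finset.sum_congr rfl
          intro m hm
          rcases Finset.mem_Icc.mp hm with ⟨hm1, hm2⟩
          rw [hins m (by omega), Finset.sum_insert (hnotmem m)]
          congr 1
          ring
        rw [hcong]
        ring
      rw [Prod.mk.injEq]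
      exact ⟨hc1, hc2⟩

-- final B characterisation
theorem snow_alt_eq (S : List Int) :
    snow_alt S = (∑ m ∈ Finset.Icc (1 : Int) (S.length : Int),
        min m (S.countP (fun x => decide (m ≤ x)) : Int))
      + (S.map (fun x => max 0 (x - (S.length : Int)))).sum := by
  show ((PySem.List.pyRange ((S.length : Int)) 0 (-1)).foldl
      (bStep (S.foldl (fun s x => (bCount (S.length : Int) s.1 x, bTail (S.length : Int) s.2 x))
        (PySem.Dict.empty, 0)).1) (0, 0)).1
    + (S.foldl (fun s x => (bCount (S.length : Int) s.1 x, bTail (S.length : Int) s.2 x))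
        (PySem.Dict.empty, 0)).2 = _
  rw [PySem.List.foldl_prod_mk (bCount (S.length : Int)) (bTail (S.length : Int)) S
    PySem.Dict.empty 0]
  rw [sweep_fold (fun j => ((S.map (bClamp (S.length : Int))).count j : Int)) _
    (fun j => cnt_getD (S.length : Int) S j) S.length 0 0]
  rw [tail_fold (S.length : Int) S 0]
  have hsum : ∀ m : Int, 1 ≤ m → m ≤ (S.length : Int) →
      ((0 : Int) + ∑ i ∈ Finset.Icc m (S.length : Int),
          ((S.map (bClamp (S.length : Int))).count i : Int))
        = (S.countP (fun x => decide (m ≤ x)) : Int) := by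
    intro m hm1 hm2
    rw [zero_add, sum_count (Finset.Icc m (S.length : Int)) (S.map (bClamp (S.length : Int))),
      List.countP_map]
    congr 1
    apply List.countP_congr
    intro x _
    simp only [Function.comp_apply, decide_eq_true_eq, Finset.mem_Icc, bClamp]
    constructor <;> intro h <;> [skip; skip] <;> omega
  have hout : ∑ m ∈ Finset.Icc (1 : Int) (S.length : Int),
        min m ((0 : Int) + ∑ i ∈ Finset.Icc m (S.length : Int),
          ((S.map (bClamp (S.length : Int))).count i : Int))
      = ∑ m ∈ Finset.Icc (1 : Int) (S.length : Int),
        min m (S.countP (fun x => decide (m ≤ x)) : Int) := by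
    apply Finset.sum_congr rfl
    intro m hm
    rcases Finset.mem_Icc.mp hm with ⟨hm1, hm2⟩
    rw [hsum m hm1 hm2]
  rw [hout]
  ring

-- ===== VERDICT (by name: the statement is the Claim_ definition above) =====
theorem snow_spec : Claim_equal_snow := by
  intro S _
  unfold Spec_snow snow
  rw [snowLoop_sum _ (t_pairwise S) 0]
  rw [← Finset.range_eq_Ico]
  rw [double_count _ (t_pairwise S)]
  rw [snow_alt_eq S]
  have hlen : ((ms S).reverse).length = S.length := (t_perm S).length_eq
  rw [hlen]
  congr 1
  · apply Finset.sum_congr rfl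
    intro m _
    rw [(t_perm S).countP_eq]
  · exact ((t_perm S).map _).sum_eq
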